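-- pv_equiv track=rewrite | github.com/tatsujin-craft/python_practice | advanced_problems/thousand_barrels.py | format_subset
-- ===== SOURCE A (Python) =====
-- def format_subset(subset):
--     lines = []
--     line_length = 10
--     for i in range(0, len(subset), line_length):
--         line = ", ".join(
--             [f"{index:>4}: {amount:>3}L" for index, amount in subset[i : i + line_length]]
--         )
--         lines.append(line)
--     return "\n".join(lines)
-- ===== SOURCE B (Python) =====
-- def format_subset(subset):
--     lines = []
--     current = []
--     for index, amount in subset:
--         current.append(f"{index:>4}: {amount:>3}L")
--         if len(current) == 10:
--             lines.append(", ".join(current))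
--             current = []
--     if current:
--         lines.append(", ".join(current))
--     return "\n".join(lines)
-- ===== Notes on version B (the rewrite author's own statement) =====
-- stated objective: alternative
-- what changed: Replaced index-based slicing of the list into chunks of 10 with a single streaming pass that accumulates formatted entries and flushes the accumulator into a line whenever it reaches 10 elements (plus a final flush).
import Mathlib
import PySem

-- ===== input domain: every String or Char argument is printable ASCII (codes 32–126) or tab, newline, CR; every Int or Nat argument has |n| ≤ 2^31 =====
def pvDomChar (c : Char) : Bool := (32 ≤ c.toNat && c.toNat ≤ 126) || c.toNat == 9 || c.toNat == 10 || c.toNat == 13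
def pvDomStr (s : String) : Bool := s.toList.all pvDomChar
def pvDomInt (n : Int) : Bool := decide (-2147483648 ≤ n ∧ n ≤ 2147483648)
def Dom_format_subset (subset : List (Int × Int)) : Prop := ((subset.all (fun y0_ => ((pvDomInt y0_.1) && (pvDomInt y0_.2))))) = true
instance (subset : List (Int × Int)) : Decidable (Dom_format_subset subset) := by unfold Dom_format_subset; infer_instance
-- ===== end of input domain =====

-- B replaces A's index-slicing into chunks of 10 by a single streaming pass with an accumulator flushed every 10 entries; same output, same cost.


-- shared f-string helper: f"{index:>4}: {amount:>3}L" (right-align with spaces, no truncation)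
def pvPad (w : Nat) (cs : List Char) : List Char := List.replicate (w - cs.length) ' ' ++ cs

def pvFmt (p : Int × Int) : String :=
  String.ofList (pvPad 4 (PySem.Int.toChars p.1) ++ ':' :: ' ' :: (pvPad 3 (PySem.Int.toChars p.2) ++ ['L']))

-- ===== PORT A =====
def format_subset (subset : List (Int × Int)) : String :=
  let lines : List String :=
    (PySem.List.pyRange 0 subset.length 10).foldl
      (fun lines i =>
        lines ++ [PySem.Str.join ", " ((PySem.List.slice subset (some i) (some (i + 10))).map pvFmt)])
      []
  PySem.Str.join "\n" lines

-- ===== PORT B =====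
def pvStep (st : List String × List String) (p : Int × Int) : List String × List String :=
  let current := st.2 ++ [pvFmt p]
  if current.length == 10 then (st.1 ++ [PySem.Str.join ", " current], []) else (st.1, current)

-- after the loop: flush a non-empty accumulator, then join the lines
def pvFinish (st : List String × List String) : String :=
  let lines := if st.2 ≠ [] then st.1 ++ [PySem.Str.join ", " st.2] else st.1
  PySem.Str.join "\n" lines

def format_subset_alt (subset : List (Int × Int)) : String :=
  pvFinish (subset.foldl pvStep ([], []))

-- ===== PRECONDITION & SPEC =====
def Spec_format_subset (subset : List (Int × Int)) (out : String) : Prop := out = format_subset_alt subset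
instance (subset : List (Int × Int)) (out : String) : Decidable (Spec_format_subset subset out) := by unfold Spec_format_subset; infer_instance

-- ===== CLAIM (what is proved, stated in full; the proofs are below) =====
def Claim_equal_format_subset : Prop := ∀ (subset : List (Int × Int)), Dom_format_subset subset → Spec_format_subset subset (format_subset subset)

-- ===== LEMMAS AND PROOFS =====

-- the common intermediate form: the list split into successive chunks of 10
def pvChunks : List (Int × Int) → List (List (Int × Int))
  | [] => []
  | x :: xs => ((x :: xs).take 10) :: pvChunks ((x :: xs).drop 10)
termination_by l => l.length
decreasing_by simp

def pvLine (c : List (Int × Int)) : String := PySem.Str.join ", " (c.map pvFmt)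

theorem pvRange10_nil (a b : Int) (h : b ≤ a) : PySem.List.pyRange a b 10 = [] := by
  rw [PySem.List.pyRange_of_pos _ _ (by norm_num), if_neg (not_lt.mpr h)]
  simp

theorem pvRange10_cons (a b : Int) (h : a < b) :
    PySem.List.pyRange a b 10 = a :: PySem.List.pyRange (a + 10) b 10 := by
  rw [PySem.List.pyRange_of_pos _ _ (by norm_num), PySem.List.pyRange_of_pos _ _ (by norm_num)]
  have h1 : ((b - a + 10 - 1) / 10).toNat
      = (if a + 10 < b then ((b - (a + 10) + 10 - 1) / 10).toNat else 0) + 1 := by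
    split_ifs with h2 <;> omega
  rw [if_pos h, h1, List.range_succ_eq_map]
  simp [List.map_map, Function.comp]
  intro k _
  ring

theorem pv_foldA (n : Nat) : ∀ (l s : List (Int × Int)) (k : Nat), l.length ≤ n → l = s.drop k →
    ∀ acc : List String,
    (PySem.List.pyRange (k : Int) (s.length : Int) 10).foldl
      (fun lines i =>
        lines ++ [PySem.Str.join ", " ((PySem.List.slice s (some i) (some (i + 10))).map pvFmt)])
      acc
    = acc ++ (pvChunks l).map pvLine := by
  induction n with
  | zero =>
    intro l s k hl hd acc
    have hnil : l = [] := List.eq_nil_of_length_eq_zero (Nat.le_zero.mp hl)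
    subst hnil
    have hk : (s.length : Int) ≤ (k : Int) := by
      have := congrArg List.length hd
      simp at this
      omega
    rw [pvRange10_nil _ _ hk]
    simp [pvChunks]
  | succ n ih =>
    intro l s k hl hd acc
    match l, hd with
    | [], hd =>
      have hk : (s.length : Int) ≤ (k : Int) := by
        have := congrArg List.length hd
        simp at this
        omega
      rw [pvRange10_nil _ _ hk]
      simp [pvChunks]
    | x :: xs, hd =>
      have hlen : s.length - k = xs.length + 1 := by
        have := congrArg List.length hd
        simpa using this.symm
      have hk : (k : Int) < (s.length : Int) := by exact_mod_cast by omega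
      rw [pvRange10_cons _ _ hk]
      simp only [List.foldl_cons]
      have h10 : ((k : Int) + 10) = ((k : Int) + ((10 : Nat) : Int)) := by norm_num
      have hslice : PySem.List.slice s (some (k : Int)) (some ((k : Int) + 10))
          = (x :: xs).take 10 := by
        rw [h10, PySem.List.slice_natCast_add, hd]
      have hdrop : (x :: xs).drop 10 = s.drop (k + 10) := by
        rw [hd, List.drop_drop]
      have hcast : ((k : Int) + 10) = ((k + 10 : Nat) : Int) := by push_cast; ring
      have hrec := ih ((x :: xs).drop 10) s (k + 10)
        (by simp at hl ⊢; omega) hdrop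
        (acc ++ [PySem.Str.join ", " (((x :: xs).take 10).map pvFmt)])
      rw [hslice, hcast, hrec, pvChunks]
      simp [pvLine]

theorem pv_noflush : ∀ (l : List (Int × Int)) (lines cur : List String),
    cur.length + l.length < 10 →
    l.foldl pvStep (lines, cur) = (lines, cur ++ l.map pvFmt)
  | [], lines, cur, _ => by simp
  | x :: xs, lines, cur, h => by
    have h0 : cur.length + (x :: xs).length < 10 := h
    have h1 : ((cur ++ [pvFmt x]).length == 10) = false := by
      simp at h0 ⊢
      omega
    have hrec := pv_noflush xs lines (cur ++ [pvFmt x]) (by simp at h0 ⊢; omega)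
    have hstep : pvStep (lines, cur) x = (lines, cur ++ [pvFmt x]) := by
      simp only [pvStep]
      rw [h1]
      simp
    rw [List.foldl_cons, hstep, hrec]
    simp

theorem pv_flush : ∀ (l : List (Int × Int)), ∀ (lines cur : List String),
    0 < l.length → cur.length + l.length = 10 →
    l.foldl pvStep (lines, cur) = (lines ++ [PySem.Str.join ", " (cur ++ l.map pvFmt)], [])
  | [], _, _, hpos, _ => by simp at hpos
  | x :: xs, lines, cur, _, h => by
    have h0 : cur.length + (x :: xs).length = 10 := h
    match xs with
    | [] =>
      have h1 : ((cur ++ [pvFmt x]).length == 10) = true := by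
        simp at h0 ⊢
        omega
      have hstep : pvStep (lines, cur) x
          = (lines ++ [PySem.Str.join ", " (cur ++ [pvFmt x])], []) := by
        simp only [pvStep]
        rw [h1]
        simp
      rw [List.foldl_cons, hstep, List.foldl_nil]
      simp
    | y :: ys =>
      have h1 : ((cur ++ [pvFmt x]).length == 10) = false := by
        simp at h0 ⊢
        omega
      have hrec := pv_flush (y :: ys) lines (cur ++ [pvFmt x]) (by simp) (by simp at h0 ⊢; omega)
      have hstep : pvStep (lines, cur) x = (lines, cur ++ [pvFmt x]) := by
        simp only [pvStep]
        rw [h1]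
        simp
      rw [List.foldl_cons, hstep, hrec]
      simp

theorem pv_foldB (n : Nat) : ∀ (l : List (Int × Int)), l.length ≤ n → ∀ lines : List String,
    pvFinish (l.foldl pvStep (lines, []))
    = PySem.Str.join "\n" (lines ++ (pvChunks l).map pvLine) := by
  induction n with
  | zero =>
    intro l hl lines
    have hnil : l = [] := List.eq_nil_of_length_eq_zero (Nat.le_zero.mp hl)
    subst hnil
    simp [pvFinish, pvChunks]
  | succ n ih =>
    intro l hl lines
    match l with
    | [] => simp [pvFinish, pvChunks]
    | x :: xs =>
      by_cases hsmall : (x :: xs).length < 10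
      · rw [pv_noflush (x :: xs) lines [] (by simpa using hsmall)]
        have hd : (x :: xs).drop 10 = [] := by
          simp at hsmall ⊢
          omega
        have ht : (x :: xs).take 10 = x :: xs :=
          List.take_of_length_le (by simp at hsmall ⊢; omega)
        rw [pvChunks, hd, ht]
        simp [pvFinish, pvChunks, pvLine]
      · have hsplit : x :: xs = (x :: xs).take 10 ++ (x :: xs).drop 10 :=
          (List.take_append_drop 10 (x :: xs)).symm
        conv_lhs => rw [hsplit]
        rw [List.foldl_append,
          pv_flush ((x :: xs).take 10) lines [] (by simp) (by simp at hsmall ⊢; omega)]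
        rw [ih ((x :: xs).drop 10) (by simp at hl ⊢; omega)]
        rw [pvChunks]
        simp [pvLine]

-- ===== VERDICT (by name: the statement is the Claim_ definition above) =====
theorem format_subset_spec : Claim_equal_format_subset := by
  intro subset _
  unfold Spec_format_subset format_subset format_subset_alt
  have hA := pv_foldA subset.length subset subset 0 le_rfl (by simp) []
  simp only [Nat.cast_zero] at hA
  rw [hA, pv_foldB subset.length subset le_rfl []]
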